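-- pv_equiv track=rewrite | github.com/VibhuKhera123/python | compiler design/delimiter_counter.py | count_delimiters
-- ===== SOURCE A (Python) =====
-- def count_delimiters(input_string, delimiters):
--     delimiter_counts = {}
--
--     for char in input_string:
--         if char in delimiters:
--             if char in delimiter_counts:
--                 delimiter_counts[char] += 1
--             else:
--                 delimiter_counts[char] = 1
--
--     return delimiter_counts
-- ===== SOURCE B (Python) =====
-- def count_delimiters(input_string, delimiters):
--     # Iterate over the DISTINCT characters of the input (first-occurrence
--     # order via dict.fromkeys); for each one that is a delimiter, let
--     # str.count rescan the whole string for its total. No incremental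
--     # counting dict is maintained at all.
--     return {ch: input_string.count(ch)
--             for ch in dict.fromkeys(input_string)
--             if ch in delimiters}
-- ===== Notes on version B (the rewrite author's own statement) =====
-- stated objective: alternative
-- what changed: B maintains no counting dict at all: it dedups the input's characters with dict.fromkeys (preserving first-occurrence order, which is A's dict key order) and, for each distinct character that is a delimiter, obtains its total with a separate str.count scan; A instead walks the string once, incrementally updating a per-character counter dict.
import Mathlib
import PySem

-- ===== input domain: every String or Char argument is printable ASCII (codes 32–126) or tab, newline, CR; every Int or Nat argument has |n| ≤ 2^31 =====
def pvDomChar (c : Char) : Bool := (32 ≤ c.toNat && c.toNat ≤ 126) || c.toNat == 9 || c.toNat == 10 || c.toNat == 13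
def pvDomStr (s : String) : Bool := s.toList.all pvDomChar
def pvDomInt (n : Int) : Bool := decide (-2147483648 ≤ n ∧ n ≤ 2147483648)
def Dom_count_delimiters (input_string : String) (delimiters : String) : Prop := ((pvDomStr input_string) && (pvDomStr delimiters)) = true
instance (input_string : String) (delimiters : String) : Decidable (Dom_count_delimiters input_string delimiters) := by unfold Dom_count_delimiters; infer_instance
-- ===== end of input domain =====

-- B keeps no counting dict at all: it dedups the input's characters (dict.fromkeys, first-occurrence
-- order) and obtains each delimiter character's total with a separate str.count scan; objective: alternative.
-- Dict keys are rendered as one-character strings per the type convention.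

-- ===== PORT A =====
-- A: one pass over the input, incrementally updating a counter dict for delimiter chars only
-- ('char in delimiters' on a 1-char string is membership of that char).
def count_delimiters (input_string : String) (delimiters : String) : List (String × Int) :=
  let counts : PySem.Dict Char Int :=
    input_string.toList.foldl (fun acc c =>
      if delimiters.toList.contains c then
        if acc.contains c then acc.insert c (acc.getD c 0 + 1)   -- delimiter_counts[char] += 1
        else acc.insert c 1                                      -- delimiter_counts[char] = 1
      else acc) PySem.Dict.empty
  counts.items.map (fun q => (String.ofList [q.1], q.2))

-- ===== PORT B =====
-- B: dedup the input's chars (dict.fromkeys = PySem.List.dedup), keep the delimiter ones,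
-- and compute each total with str.count (PySem.Str.count on the 1-char needle).
def count_delimiters_alt (input_string : String) (delimiters : String) : List (String × Int) :=
  ((PySem.List.dedup input_string.toList).filter
      (fun c => delimiters.toList.contains c)).map
    (fun c => (String.ofList [c], (PySem.Str.count input_string (String.ofList [c]) : Int)))

-- ===== PRECONDITION & SPEC =====
def Spec_count_delimiters (input_string : String) (delimiters : String) (out : List (String × Int)) : Prop := out = count_delimiters_alt input_string delimiters
instance (input_string : String) (delimiters : String) (out : List (String × Int)) : Decidable (Spec_count_delimiters input_string delimiters out) := by unfold Spec_count_delimiters; infer_instance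

-- ===== CLAIM (what is proved, stated in full; the proofs are below) =====
def Claim_equal_count_delimiters : Prop := ∀ (input_string : String) (delimiters : String), Dom_count_delimiters input_string delimiters → Spec_count_delimiters input_string delimiters (count_delimiters input_string delimiters)

-- ===== LEMMAS AND PROOFS =====

-- str.count with a single-character needle is List.count of that character
theorem pv_count_go_single (c : Char) (s : List Char) :
    ∀ (acc : ℕ), PySem.Chars.count.go [c] s.length s acc = acc + s.count c := by
  induction s with
  | nil => intro acc; simp [PySem.Chars.count.go]
  | cons h t ih =>
    intro acc
    rw [List.length_cons, PySem.Chars.count.go]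
    by_cases hc : h = c
    · simp [List.isPrefixOf, hc, ih]
      omega
    · simp [List.isPrefixOf, ih, hc]
      exact fun h2 => hc h2.symm

theorem pv_count_single (s : List Char) (c : Char) :
    PySem.Chars.count s [c] = s.count c := by
  simp [PySem.Chars.count, pv_count_go_single]

-- first-occurrence dedup commutes with filtering
theorem pv_ofList_filter (p : Char → Bool) (xs : List Char) :
    PySem.Set.ofList (xs.filter p) = (PySem.Set.ofList xs).filter p := by
  induction xs using List.reverseRecOn with
  | nil => rfl
  | append_singleton xs c ih =>
    rw [List.filter_append, PySem.Set.ofList_append_singleton]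
    by_cases hp : p c
    · simp only [List.filter_cons, hp, if_pos, List.filter_nil]
      rw [PySem.Set.ofList_append_singleton, ih]
      by_cases hm : c ∈ xs
      · rw [PySem.Set.add_of_mem (by simp [List.mem_filter, PySem.Set.mem_ofList, hm, hp]),
            PySem.Set.add_of_mem (by simp [PySem.Set.mem_ofList, hm])]
      · rw [PySem.Set.add_of_not_mem (by simp [PySem.Set.mem_ofList, hm]),
            PySem.Set.add_of_not_mem (by simp [PySem.Set.mem_ofList, hm])]
        simp [List.filter_append, hp]
    · simp only [List.filter_cons, hp, List.filter_nil]
      simp only [Bool.false_eq_true, if_false, List.append_nil]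
      rw [ih]
      by_cases hm : c ∈ xs
      · rw [PySem.Set.add_of_mem (by simp [PySem.Set.mem_ofList, hm])]
      · rw [PySem.Set.add_of_not_mem (by simp [PySem.Set.mem_ofList, hm])]
        simp [List.filter_append, hp]

-- A's loop counts exactly the delimiter characters: it is Counter(filtered input)
theorem pv_A_fold_eq_counter (xs ds : List Char) :
    xs.foldl (fun acc c =>
      if ds.contains c then
        if acc.contains c then acc.insert c (acc.getD c 0 + 1)
        else acc.insert c 1
      else acc) PySem.Dict.empty
    = PySem.Dict.counter (xs.filter (fun c => ds.contains c)) := by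
  have hstep : (fun (acc : PySem.Dict Char Int) c =>
      if ds.contains c then
        if acc.contains c then acc.insert c (acc.getD c 0 + 1)
        else acc.insert c 1
      else acc)
    = (fun (acc : PySem.Dict Char Int) c =>
      if ds.contains c then acc.insert c (acc.getD c 0 + 1) else acc) := by
    funext acc c
    by_cases hd : ds.contains c = true
    · rw [if_pos hd, if_pos hd]
      by_cases hc : acc.contains c = true
      · rw [if_pos hc]
      · rw [if_neg hc, PySem.Dict.getD_of_not_contains]
        · norm_num
        · exact Bool.eq_false_iff.mpr hc
    · rw [if_neg hd, if_neg hd]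
  rw [hstep, ← List.foldl_filter, PySem.Dict.foldl_insert_getD_add_one_eq_counter]

theorem count_delimiters_eq (input_string delimiters : String) :
    count_delimiters input_string delimiters = count_delimiters_alt input_string delimiters := by
  simp only [count_delimiters, count_delimiters_alt]
  rw [pv_A_fold_eq_counter, PySem.Dict.items_counter, List.map_map]
  rw [pv_ofList_filter, ← PySem.List.dedup_eq_ofList]
  apply List.map_congr_left
  intro k hk
  have hp : delimiters.toList.contains k = true := (List.mem_filter.mp hk).2
  have hcnt : List.count k (input_string.toList.filter (fun c => delimiters.toList.contains c))
      = List.count k input_string.toList := List.count_filter hp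
  have hstr : PySem.Str.count input_string (String.ofList [k])
      = input_string.toList.count k := by
    have : (String.ofList [k]).toList = [k] := by simp
    simp [PySem.Str.count, this, pv_count_single]
  simp only [Function.comp_apply, hcnt, hstr]

-- ===== VERDICT (by name: the statement is the Claim_ definition above) =====
theorem count_delimiters_spec : Claim_equal_count_delimiters := by
  intro s d _
  unfold Spec_count_delimiters
  exact count_delimiters_eq s d
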